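-- pv_equiv track=rewrite | github.com/amberxuqianchen/fmri-tutorial | module_09_fmriprep_outputs/scripts/inspect_fmriprep_outputs.py | group_confound_columns
-- ===== SOURCE A (Python) =====
-- def group_confound_columns(columns):
--     """Group confound column names by type.
--
--     Args:
--         columns (list[str]): List of column names from the confounds TSV.
--
--     Returns:
--         dict: Mapping of group name to list of column names.
--     """
--     col_set = set(columns)
--
--     groups = {
--         "Motion (6-param)": [
--             c for c in columns
--             if c in {"trans_x", "trans_y", "trans_z", "rot_x", "rot_y", "rot_z"}
--         ],
--         "Motion derivatives": [
--             c for c in columns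
--             if "derivative1" in c and "power2" not in c
--         ],
--         "Motion squares": [
--             c for c in columns if c.endswith("_power2") and "derivative" not in c
--         ],
--         "Motion derivative squares": [
--             c for c in columns if "derivative1_power2" in c
--         ],
--         "Motion summary": [
--             c for c in columns if c in {"framewise_displacement", "rmsd"}
--         ],
--         "Tissue signals": [
--             c for c in columns if c in {"global_signal", "white_matter", "csf"}
--         ],
--         "aCompCor": [c for c in columns if c.startswith("a_comp_cor")],
--         "tCompCor": [c for c in columns if c.startswith("t_comp_cor")],
--         "ICA-AROMA": [c for c in columns if "aroma" in c.lower()],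
--         "Cosine drift": [c for c in columns if c.startswith("cosine")],
--     }
--
--     labelled = {c for cols in groups.values() for c in cols}
--     groups["Other"] = [c for c in columns if c not in labelled]
--
--     # Remove empty groups
--     return {k: v for k, v in groups.items() if v}
-- ===== SOURCE B (Python) =====
-- def group_confound_columns(columns):
--     """Group confound column names by type (single pass over columns)."""
--     motion = []; deriv = []; squares = []; dsq = []; summary = []
--     tissue = []; acomp = []; tcomp = []; aroma = []; cosine = []; other = []
--     for c in columns:
--         m = False
--         if c in {"trans_x", "trans_y", "trans_z", "rot_x", "rot_y", "rot_z"}: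
--             motion.append(c); m = True
--         if "derivative1" in c and "power2" not in c:
--             deriv.append(c); m = True
--         if c.endswith("_power2") and "derivative" not in c:
--             squares.append(c); m = True
--         if "derivative1_power2" in c:
--             dsq.append(c); m = True
--         if c in {"framewise_displacement", "rmsd"}:
--             summary.append(c); m = True
--         if c in {"global_signal", "white_matter", "csf"}:
--             tissue.append(c); m = True
--         if c.startswith("a_comp_cor"):
--             acomp.append(c); m = True
--         if c.startswith("t_comp_cor"):
--             tcomp.append(c); m = True
--         if "aroma" in c.lower():
--             aroma.append(c); m = True
--         if c.startswith("cosine"):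
--             cosine.append(c); m = True
--         if not m:
--             other.append(c)
--     groups = [
--         ("Motion (6-param)", motion),
--         ("Motion derivatives", deriv),
--         ("Motion squares", squares),
--         ("Motion derivative squares", dsq),
--         ("Motion summary", summary),
--         ("Tissue signals", tissue),
--         ("aCompCor", acomp),
--         ("tCompCor", tcomp),
--         ("ICA-AROMA", aroma),
--         ("Cosine drift", cosine),
--         ("Other", other),
--     ]
--     return {k: v for k, v in groups if v}
-- ===== Notes on version B (the rewrite author's own statement) =====
-- stated objective: alternative
-- what changed: A scans the column list eleven times (one comprehension per group plus a labelled-set pass for 'Other'); B makes a single pass over the columns, appending each column to every matching bucket and to 'Other' when no predicate matches, then keeps the non-empty groups in the same fixed order.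
import Mathlib
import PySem

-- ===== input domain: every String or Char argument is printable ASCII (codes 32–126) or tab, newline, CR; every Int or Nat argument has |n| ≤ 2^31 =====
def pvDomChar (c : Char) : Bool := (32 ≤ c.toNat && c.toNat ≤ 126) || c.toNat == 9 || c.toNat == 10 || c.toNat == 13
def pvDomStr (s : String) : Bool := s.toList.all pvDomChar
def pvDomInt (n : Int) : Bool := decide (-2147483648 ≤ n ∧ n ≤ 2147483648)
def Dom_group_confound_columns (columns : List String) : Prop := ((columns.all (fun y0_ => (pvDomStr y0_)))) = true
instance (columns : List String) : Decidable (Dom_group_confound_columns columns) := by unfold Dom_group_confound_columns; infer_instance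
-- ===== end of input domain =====

-- B replaces A's eleven separate scans of `columns` (one comprehension per group plus a
-- labelled-set pass for "Other") by a single loop over `columns` that appends each column
-- to every matching bucket and to "Other" when none matches (objective: alternative).

-- ===== PORT A =====
def group_confound_columns (columns : List String) : List (String × List String) :=
  let _col_set : PySem.Set String := PySem.Set.ofList columns   -- A computes col_set but never uses it
  let groups : List (String × List String) :=
    [("Motion (6-param)", columns.filter (fun c =>
        PySem.Set.contains (PySem.Set.ofList ["trans_x", "trans_y", "trans_z", "rot_x", "rot_y", "rot_z"]) c)),
     ("Motion derivatives", columns.filter (fun c =>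
        PySem.Str.isIn "derivative1" c && !(PySem.Str.isIn "power2" c))),
     ("Motion squares", columns.filter (fun c =>
        PySem.Str.endswith c "_power2" && !(PySem.Str.isIn "derivative" c))),
     ("Motion derivative squares", columns.filter (fun c =>
        PySem.Str.isIn "derivative1_power2" c)),
     ("Motion summary", columns.filter (fun c =>
        PySem.Set.contains (PySem.Set.ofList ["framewise_displacement", "rmsd"]) c)),
     ("Tissue signals", columns.filter (fun c =>
        PySem.Set.contains (PySem.Set.ofList ["global_signal", "white_matter", "csf"]) c)),
     ("aCompCor", columns.filter (fun c => PySem.Str.startswith c "a_comp_cor")),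
     ("tCompCor", columns.filter (fun c => PySem.Str.startswith c "t_comp_cor")),
     ("ICA-AROMA", columns.filter (fun c => PySem.Str.isIn "aroma" (PySem.Str.lower c))),
     ("Cosine drift", columns.filter (fun c => PySem.Str.startswith c "cosine"))]
  let labelled : PySem.Set String := PySem.Set.ofList ((groups.map Prod.snd).flatten)
  let groups := groups ++ [("Other", columns.filter (fun c => !(PySem.Set.contains labelled c)))]
  groups.filter (fun kv => !kv.2.isEmpty)

-- ===== PORT B =====
-- B keeps eleven buckets (one local list per group in Source B) and fills them in one pass.
structure BSt where
  motion : List String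
  deriv : List String
  squares : List String
  dsq : List String
  summary : List String
  tissue : List String
  acomp : List String
  tcomp : List String
  aroma : List String
  cosine : List String
  other : List String
deriving Repr, DecidableEq

def bStep (st : BSt) (c : String) : BSt :=
  let m := false
  let motion := if PySem.Set.contains (PySem.Set.ofList ["trans_x", "trans_y", "trans_z", "rot_x", "rot_y", "rot_z"]) c then st.motion ++ [c] else st.motion
  let m := if PySem.Set.contains (PySem.Set.ofList ["trans_x", "trans_y", "trans_z", "rot_x", "rot_y", "rot_z"]) c then true else m
  let deriv := if PySem.Str.isIn "derivative1" c && !(PySem.Str.isIn "power2" c) then st.deriv ++ [c] else st.deriv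
  let m := if PySem.Str.isIn "derivative1" c && !(PySem.Str.isIn "power2" c) then true else m
  let squares := if PySem.Str.endswith c "_power2" && !(PySem.Str.isIn "derivative" c) then st.squares ++ [c] else st.squares
  let m := if PySem.Str.endswith c "_power2" && !(PySem.Str.isIn "derivative" c) then true else m
  let dsq := if PySem.Str.isIn "derivative1_power2" c then st.dsq ++ [c] else st.dsq
  let m := if PySem.Str.isIn "derivative1_power2" c then true else m
  let summary := if PySem.Set.contains (PySem.Set.ofList ["framewise_displacement", "rmsd"]) c then st.summary ++ [c] else st.summary
  let m := if PySem.Set.contains (PySem.Set.ofList ["framewise_displacement", "rmsd"]) c then true else m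
  let tissue := if PySem.Set.contains (PySem.Set.ofList ["global_signal", "white_matter", "csf"]) c then st.tissue ++ [c] else st.tissue
  let m := if PySem.Set.contains (PySem.Set.ofList ["global_signal", "white_matter", "csf"]) c then true else m
  let acomp := if PySem.Str.startswith c "a_comp_cor" then st.acomp ++ [c] else st.acomp
  let m := if PySem.Str.startswith c "a_comp_cor" then true else m
  let tcomp := if PySem.Str.startswith c "t_comp_cor" then st.tcomp ++ [c] else st.tcomp
  let m := if PySem.Str.startswith c "t_comp_cor" then true else m
  let aroma := if PySem.Str.isIn "aroma" (PySem.Str.lower c) then st.aroma ++ [c] else st.aroma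
  let m := if PySem.Str.isIn "aroma" (PySem.Str.lower c) then true else m
  let cosine := if PySem.Str.startswith c "cosine" then st.cosine ++ [c] else st.cosine
  let m := if PySem.Str.startswith c "cosine" then true else m
  let other := if m then st.other else st.other ++ [c]
  ⟨motion, deriv, squares, dsq, summary, tissue, acomp, tcomp, aroma, cosine, other⟩

def group_confound_columns_alt (columns : List String) : List (String × List String) :=
  let st := columns.foldl bStep ⟨[], [], [], [], [], [], [], [], [], [], []⟩
  let groups : List (String × List String) :=
    [("Motion (6-param)", st.motion),
     ("Motion derivatives", st.deriv),
     ("Motion squares", st.squares),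
     ("Motion derivative squares", st.dsq),
     ("Motion summary", st.summary),
     ("Tissue signals", st.tissue),
     ("aCompCor", st.acomp),
     ("tCompCor", st.tcomp),
     ("ICA-AROMA", st.aroma),
     ("Cosine drift", st.cosine),
     ("Other", st.other)]
  groups.filter (fun kv => !kv.2.isEmpty)

-- ===== PRECONDITION & SPEC =====
def Spec_group_confound_columns (columns : List String) (out : List (String × List String)) : Prop := out = group_confound_columns_alt columns
instance (columns : List String) (out : List (String × List String)) : Decidable (Spec_group_confound_columns columns out) := by unfold Spec_group_confound_columns; infer_instance

-- ===== CLAIM (what is proved, stated in full; the proofs are below) =====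
def Claim_equal_group_confound_columns : Prop := ∀ (columns : List String), Dom_group_confound_columns columns → Spec_group_confound_columns columns (group_confound_columns columns)

-- ===== LEMMAS AND PROOFS =====
-- The ten group predicates, definitionally equal to the inline conditions of both ports.
def q1 (c : String) : Bool := PySem.Set.contains (PySem.Set.ofList ["trans_x", "trans_y", "trans_z", "rot_x", "rot_y", "rot_z"]) c
def q2 (c : String) : Bool := PySem.Str.isIn "derivative1" c && !(PySem.Str.isIn "power2" c)
def q3 (c : String) : Bool := PySem.Str.endswith c "_power2" && !(PySem.Str.isIn "derivative" c)
def q4 (c : String) : Bool := PySem.Str.isIn "derivative1_power2" c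
def q5 (c : String) : Bool := PySem.Set.contains (PySem.Set.ofList ["framewise_displacement", "rmsd"]) c
def q6 (c : String) : Bool := PySem.Set.contains (PySem.Set.ofList ["global_signal", "white_matter", "csf"]) c
def q7 (c : String) : Bool := PySem.Str.startswith c "a_comp_cor"
def q8 (c : String) : Bool := PySem.Str.startswith c "t_comp_cor"
def q9 (c : String) : Bool := PySem.Str.isIn "aroma" (PySem.Str.lower c)
def q10 (c : String) : Bool := PySem.Str.startswith c "cosine"
def qO (c : String) : Bool := !(q1 c || q2 c || q3 c || q4 c || q5 c || q6 c || q7 c || q8 c || q9 c || q10 c)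

lemma ite_app (b : Bool) (a : List String) (c : String) :
    (if b then a ++ [c] else a) = a ++ (if b then [c] else []) := by cases b <;> simp

lemma ite_other (b : Bool) (a : List String) (c : String) :
    (if b then a else a ++ [c]) = a ++ (if !b then [c] else []) := by cases b <;> simp

lemma ite_cons (b : Bool) (c : String) (l : List String) :
    (if b then [c] else []) ++ l = if b then c :: l else l := by cases b <;> simp

lemma chainOr : ∀ (b1 b2 b3 b4 b5 b6 b7 b8 b9 b10 : Bool),
    (if b10 then true else if b9 then true else if b8 then true else if b7 then true
     else if b6 then true else if b5 then true else if b4 then true else if b3 then true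
     else if b2 then true else if b1 then true else false)
      = (b1 || b2 || b3 || b4 || b5 || b6 || b7 || b8 || b9 || b10) := by decide

lemma bStep_eq (st : BSt) (c : String) :
    bStep st c = ⟨st.motion ++ (if q1 c then [c] else []),
                  st.deriv ++ (if q2 c then [c] else []),
                  st.squares ++ (if q3 c then [c] else []),
                  st.dsq ++ (if q4 c then [c] else []),
                  st.summary ++ (if q5 c then [c] else []),
                  st.tissue ++ (if q6 c then [c] else []),
                  st.acomp ++ (if q7 c then [c] else []),
                  st.tcomp ++ (if q8 c then [c] else []),
                  st.aroma ++ (if q9 c then [c] else []),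
                  st.cosine ++ (if q10 c then [c] else []),
                  st.other ++ (if qO c then [c] else [])⟩ := by
  simp only [bStep, q1, q2, q3, q4, q5, q6, q7, q8, q9, q10, qO]
  rw [chainOr]
  simp only [ite_app, ite_other]
  rfl

lemma fold_bStep (xs : List String) (st : BSt) :
    xs.foldl bStep st =
      ⟨st.motion ++ xs.filter q1, st.deriv ++ xs.filter q2, st.squares ++ xs.filter q3,
       st.dsq ++ xs.filter q4, st.summary ++ xs.filter q5, st.tissue ++ xs.filter q6,
       st.acomp ++ xs.filter q7, st.tcomp ++ xs.filter q8, st.aroma ++ xs.filter q9,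
       st.cosine ++ xs.filter q10, st.other ++ xs.filter qO⟩ := by
  induction xs generalizing st with
  | nil => simp
  | cons c cs ih =>
    rw [List.foldl_cons, bStep_eq, ih]
    simp [List.filter_cons, List.append_assoc, ite_cons]

def groupsQ (columns : List String) : List (String × List String) :=
  [("Motion (6-param)", columns.filter q1), ("Motion derivatives", columns.filter q2),
   ("Motion squares", columns.filter q3), ("Motion derivative squares", columns.filter q4),
   ("Motion summary", columns.filter q5), ("Tissue signals", columns.filter q6),
   ("aCompCor", columns.filter q7), ("tCompCor", columns.filter q8),
   ("ICA-AROMA", columns.filter q9), ("Cosine drift", columns.filter q10)]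

lemma labelled_pred (columns : List String) (c : String) (hc : c ∈ columns) :
    (!(PySem.Set.contains (PySem.Set.ofList ((groupsQ columns).map Prod.snd).flatten) c)) = qO c := by
  have h : PySem.Set.contains (PySem.Set.ofList ((groupsQ columns).map Prod.snd).flatten) c
      = (q1 c || q2 c || q3 c || q4 c || q5 c || q6 c || q7 c || q8 c || q9 c || q10 c) := by
    rw [Bool.eq_iff_iff]
    simp only [PySem.Set.contains_eq_listContains, List.contains_eq_mem, PySem.Set.mem_ofList,
      decide_eq_true_eq, List.mem_flatten, List.mem_map, groupsQ]
    constructor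
    · rintro ⟨l, ⟨⟨k, v⟩, hkv, rfl⟩, hcl⟩
      simp only [List.mem_cons, List.not_mem_nil, or_false, Prod.mk.injEq] at hkv
      rcases hkv with ⟨_, rfl⟩ | ⟨_, rfl⟩ | ⟨_, rfl⟩ | ⟨_, rfl⟩ | ⟨_, rfl⟩ | ⟨_, rfl⟩ |
        ⟨_, rfl⟩ | ⟨_, rfl⟩ | ⟨_, rfl⟩ | ⟨_, rfl⟩ <;>
        simp only [List.mem_filter] at hcl <;> simp [hcl.2]
    · intro hq
      simp only [Bool.or_eq_true] at hq
      rcases hq with (((((((((h | h) | h) | h) | h) | h) | h) | h) | h) | h)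
      · exact ⟨columns.filter q1, ⟨("Motion (6-param)", columns.filter q1), by simp, rfl⟩,
          List.mem_filter.mpr ⟨hc, h⟩⟩
      · exact ⟨columns.filter q2, ⟨("Motion derivatives", columns.filter q2), by simp, rfl⟩,
          List.mem_filter.mpr ⟨hc, h⟩⟩
      · exact ⟨columns.filter q3, ⟨("Motion squares", columns.filter q3), by simp, rfl⟩,
          List.mem_filter.mpr ⟨hc, h⟩⟩
      · exact ⟨columns.filter q4, ⟨("Motion derivative squares", columns.filter q4), by simp, rfl⟩,
          List.mem_filter.mpr ⟨hc, h⟩⟩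
      · exact ⟨columns.filter q5, ⟨("Motion summary", columns.filter q5), by simp, rfl⟩,
          List.mem_filter.mpr ⟨hc, h⟩⟩
      · exact ⟨columns.filter q6, ⟨("Tissue signals", columns.filter q6), by simp, rfl⟩,
          List.mem_filter.mpr ⟨hc, h⟩⟩
      · exact ⟨columns.filter q7, ⟨("aCompCor", columns.filter q7), by simp, rfl⟩,
          List.mem_filter.mpr ⟨hc, h⟩⟩
      · exact ⟨columns.filter q8, ⟨("tCompCor", columns.filter q8), by simp, rfl⟩,
          List.mem_filter.mpr ⟨hc, h⟩⟩
      · exact ⟨columns.filter q9, ⟨("ICA-AROMA", columns.filter q9), by simp, rfl⟩,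
          List.mem_filter.mpr ⟨hc, h⟩⟩
      · exact ⟨columns.filter q10, ⟨("Cosine drift", columns.filter q10), by simp, rfl⟩,
          List.mem_filter.mpr ⟨hc, h⟩⟩
  rw [h]; rfl

lemma A_char (columns : List String) :
    group_confound_columns columns =
      (groupsQ columns ++ [("Other", columns.filter qO)]).filter (fun kv => !kv.2.isEmpty) := by
  show ((groupsQ columns ++ [("Other", columns.filter (fun c =>
      !(PySem.Set.contains (PySem.Set.ofList ((groupsQ columns).map Prod.snd).flatten) c)))]).filter
        (fun kv => !kv.2.isEmpty)) = _
  rw [List.filter_congr (fun c hc => labelled_pred columns c hc)]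

lemma B_char (columns : List String) :
    group_confound_columns_alt columns =
      (groupsQ columns ++ [("Other", columns.filter qO)]).filter (fun kv => !kv.2.isEmpty) := by
  unfold group_confound_columns_alt
  rw [fold_bStep]
  simp [groupsQ]

-- ===== VERDICT (by name: the statement is the Claim_ definition above) =====
theorem group_confound_columns_spec : Claim_equal_group_confound_columns := by
  intro columns _
  unfold Spec_group_confound_columns
  exact (A_char columns).trans (B_char columns).symm
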